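-- pv_equiv track=rewrite | github.com/trinhhungfischer/enigma-machine | enigma/enigma.py | set_reflector
-- ===== SOURCE A (Python) =====
-- import string
--
-- def set_reflector(reflectors = None):
--   if reflectors is None:
--     return
--
--   reflectors = reflectors.upper()
--   alphabet_list = string.ascii_uppercase
--
--   maping = {}
--   letter_pairs = reflectors.split(' ')
--   results = [0] * 26
--
--   for letter_pair in letter_pairs:
--     maping[letter_pair[0]] = letter_pair[1]
--     maping[letter_pair[1]] = letter_pair[0]
--
--   for (i, letter) in enumerate(alphabet_list):
--     if letter in maping:
--       results[i] = alphabet_list.index(maping[letter])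
--     else:
--       results[i] = i
--
--   return results
-- ===== SOURCE B (Python) =====
-- import string
--
-- def set_reflector(reflectors = None):
--   if reflectors is None:
--     return
--
--   uppercase = string.ascii_uppercase
--   results = list(range(26))
--
--   for pair in reflectors.upper().split(' '):
--     a, b = pair[0], pair[1]
--     if a in uppercase and b in uppercase:
--       results[ord(a) - 65] = ord(b) - 65
--       results[ord(b) - 65] = ord(a) - 65
--
--   return results
-- ===== Notes on version B (the rewrite author's own statement) =====
-- stated objective: simpler
-- what changed: B removes A's intermediate mapping dict and the full 26-letter scan: it starts from the identity permutation list(range(26)) and, in a single pass over the letter pairs, writes only the two swapped slots (guarded by both characters being uppercase letters).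
import Mathlib
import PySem

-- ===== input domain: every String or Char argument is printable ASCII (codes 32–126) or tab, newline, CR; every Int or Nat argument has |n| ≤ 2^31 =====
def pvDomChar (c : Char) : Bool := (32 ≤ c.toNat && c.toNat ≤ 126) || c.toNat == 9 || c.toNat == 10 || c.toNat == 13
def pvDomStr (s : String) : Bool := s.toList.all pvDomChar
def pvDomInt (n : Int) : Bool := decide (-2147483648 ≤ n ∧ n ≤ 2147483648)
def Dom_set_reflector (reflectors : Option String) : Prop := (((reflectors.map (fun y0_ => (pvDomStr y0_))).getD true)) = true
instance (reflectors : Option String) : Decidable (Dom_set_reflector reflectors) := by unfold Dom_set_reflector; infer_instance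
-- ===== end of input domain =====

-- B drops A's intermediate dict and full 26-letter scan: it starts from the identity permutation
-- and writes only the two swapped slots per pair, in one pass over the pairs (objective: simpler).

-- string.ascii_uppercase, as a character list
def pvAlpha : List Char := ['A','B','C','D','E','F','G','H','I','J','K','L','M','N','O','P','Q','R','S','T','U','V','W','X','Y','Z']

-- ===== PORT A =====
def set_reflector (reflectors : Option String) : Option (List Int) :=
  match reflectors with
  | none => none
  | some r0 =>
    let r := PySem.Chars.upper r0.toList
    let letterPairs := PySem.Chars.splitOn r [' ']
    -- first loop: maping[letter_pair[0]] = letter_pair[1]; maping[letter_pair[1]] = letter_pair[0]  (none = IndexError)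
    let maping? : Option (PySem.Dict Char Char) :=
      letterPairs.foldl (fun acc p =>
        acc.bind fun d =>
        (PySem.List.pyGet? p 0).bind fun a =>
        (PySem.List.pyGet? p 1).map fun b =>
        (d.insert a b).insert b a) (some PySem.Dict.empty)
    maping?.bind fun maping =>
      -- second loop over enumerate(alphabet_list)  (none = ValueError from .index, i.e. find = -1)
      (PySem.List.enumerate pvAlpha).foldl (fun acc il =>
        acc.bind fun res =>
          if maping.contains il.2 then
            (maping.get? il.2).bind fun v =>
              let j := PySem.Chars.find pvAlpha [v]
              if j = -1 then none else some (PySem.List.pySetD res il.1 j)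
          else some (PySem.List.pySetD res il.1 il.1))
        (some (List.replicate 26 (0 : Int)))

-- ===== PORT B =====
def set_reflector_alt (reflectors : Option String) : Option (List Int) :=
  match reflectors with
  | none => none
  | some r0 =>
    let pairs := PySem.Chars.splitOn (PySem.Chars.upper r0.toList) [' ']
    pairs.foldl (fun acc p =>
      acc.bind fun res =>
      (PySem.List.pyGet? p 0).bind fun a =>
      (PySem.List.pyGet? p 1).map fun b =>
      if PySem.Chars.isIn [a] pvAlpha && PySem.Chars.isIn [b] pvAlpha then
        PySem.List.pySetD
          (PySem.List.pySetD res ((a.toNat : Int) - 65) ((b.toNat : Int) - 65))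
          ((b.toNat : Int) - 65) ((a.toNat : Int) - 65)
      else res)
      (some (PySem.List.pyRange 0 26 1))

-- ===== PRECONDITION & SPEC =====
-- the dict writes performed by A's first loop, pair by pair (meaningful for pieces of length ≥ 2)
def pvWrites (ps : List (List Char)) : List (Char × Char) :=
  ps.flatMap (fun p => [(p.getD 0 ' ', p.getD 1 ' '), (p.getD 1 ' ', p.getD 0 ' ')])

-- Pre_ is exactly where A returns: every space-separated piece has ≥ 2 characters (else IndexError),
-- and the last value the loop writes for each uppercase letter is itself an uppercase letter (else ValueError).
def Pre_set_reflector (reflectors : Option String) : Prop :=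
  match reflectors with
  | none => True
  | some r0 =>
    let ps := PySem.Chars.splitOn (PySem.Chars.upper r0.toList) [' ']
    (ps.all (fun p => 2 ≤ p.length)) = true ∧
    (pvAlpha.all (fun c =>
      ((pvWrites ps).reverse.find? (fun w => w.1 == c)).all (fun w => pvAlpha.contains w.2))) = true
instance (reflectors : Option String) : Decidable (Pre_set_reflector reflectors) := by
  unfold Pre_set_reflector
  cases reflectors <;> infer_instance

def pvWitness_set_reflector : Option String := some "AB CD"

def Spec_set_reflector (reflectors : Option String) (out : Option (List Int)) : Prop := out = set_reflector_alt reflectors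
instance (reflectors : Option String) (out : Option (List Int)) : Decidable (Spec_set_reflector reflectors out) := by unfold Spec_set_reflector; infer_instance

-- ===== CLAIM (what is proved, stated in full; the proofs are below) =====
def Claim_equal_set_reflector : Prop := ∀ (reflectors : Option String), Dom_set_reflector reflectors → Pre_set_reflector reflectors → Spec_set_reflector reflectors (set_reflector reflectors)

-- ===== LEMMAS AND PROOFS =====

-- write-level steps of A's dict-building loop and of B's array loop
def pvIns (d : PySem.Dict Char Char) (w : Char × Char) : PySem.Dict Char Char := d.insert w.1 w.2
def pvStep (res : List Int) (w : Char × Char) : List Int :=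
  if w.1 ∈ pvAlpha ∧ w.2 ∈ pvAlpha then
    PySem.List.pySetD res ((w.1.toNat : Int) - 65) ((w.2.toNat : Int) - 65)
  else res

-- the relation B's array keeps with A's dict
def pvGood (d : PySem.Dict Char Char) (res : List Int) : Prop :=
  res.length = 26 ∧ ∀ c ∈ pvAlpha,
    (∀ v, d.get? c = some v → v ∈ pvAlpha → res.getD (c.toNat - 65) 0 = (v.toNat : Int) - 65) ∧
    (d.get? c = none → res.getD (c.toNat - 65) 0 = (c.toNat : Int) - 65)

lemma pv_char_bounds : ∀ c ∈ pvAlpha, 65 ≤ c.toNat ∧ c.toNat ≤ 90 := by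
  intro c hc; fin_cases hc <;> exact ⟨by decide, by decide⟩

lemma pv_toNat_inj {c k : Char} (h : c.toNat = k.toNat) : c = k :=
  Char.ext (UInt32.toNat_inj.mp h)

lemma pv_find_alpha : ∀ v ∈ pvAlpha, PySem.Chars.find pvAlpha [v] = (v.toNat : Int) - 65 := by
  intro v hv; fin_cases hv <;> decide

lemma pv_isIn_singleton (a : Char) (L : List Char) :
    PySem.Chars.isIn [a] L = true ↔ a ∈ L := by
  rw [PySem.Chars.isIn_iff_infix, List.singleton_infix_iff]

lemma pv_buildA (ps : List (List Char)) (d : PySem.Dict Char Char)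
    (h : ∀ p ∈ ps, 2 ≤ p.length) :
    ps.foldl (fun acc p =>
        acc.bind fun d =>
        (PySem.List.pyGet? p 0).bind fun a =>
        (PySem.List.pyGet? p 1).map fun b =>
        (d.insert a b).insert b a) (some d)
      = some ((pvWrites ps).foldl pvIns d) := by
  induction ps generalizing d with
  | nil => simp [pvWrites]
  | cons p ps ih =>
    obtain ⟨x, y, t, rfl⟩ : ∃ x y t, p = x :: y :: t := by
      have hp := h p (by simp)
      match p, hp with | x :: y :: t, _ => exact ⟨x, y, t, rfl⟩
    rw [List.foldl_cons]
    have h2 : ∀ q ∈ ps, 2 ≤ q.length := fun q hq => h q (List.mem_cons_of_mem _ hq)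
    simp only [Option.bind_some]
    rw [show PySem.List.pyGet? (x :: y :: t) 0 = some x by simp [PySem.List.pyGet?_zero]]
    rw [show PySem.List.pyGet? (x :: y :: t) 1 = some y by
      simp [PySem.List.pyGet?, PySem.List.pyIdx?]]
    simp only [Option.bind_some, Option.map_some]
    rw [ih _ h2]
    simp [pvWrites, pvIns]

lemma pv_buildB (ps : List (List Char)) (res : List Int)
    (h : ∀ p ∈ ps, 2 ≤ p.length) :
    ps.foldl (fun acc p =>
        acc.bind fun res =>
        (PySem.List.pyGet? p 0).bind fun a =>
        (PySem.List.pyGet? p 1).map fun b =>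
        if PySem.Chars.isIn [a] pvAlpha && PySem.Chars.isIn [b] pvAlpha then
          PySem.List.pySetD
            (PySem.List.pySetD res ((a.toNat : Int) - 65) ((b.toNat : Int) - 65))
            ((b.toNat : Int) - 65) ((a.toNat : Int) - 65)
        else res) (some res)
      = some ((pvWrites ps).foldl pvStep res) := by
  induction ps generalizing res with
  | nil => simp [pvWrites]
  | cons p ps ih =>
    obtain ⟨x, y, t, rfl⟩ : ∃ x y t, p = x :: y :: t := by
      have hp := h p (by simp)
      match p, hp with | x :: y :: t, _ => exact ⟨x, y, t, rfl⟩
    rw [List.foldl_cons]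
    have h2 : ∀ q ∈ ps, 2 ≤ q.length := fun q hq => h q (List.mem_cons_of_mem _ hq)
    simp only [Option.bind_some]
    rw [show PySem.List.pyGet? (x :: y :: t) 0 = some x by simp [PySem.List.pyGet?_zero]]
    rw [show PySem.List.pyGet? (x :: y :: t) 1 = some y by
      simp [PySem.List.pyGet?, PySem.List.pyIdx?]]
    simp only [Option.bind_some, Option.map_some]
    rw [ih _ h2]
    congr 1
    show _ = (pvWrites ((x :: y :: t) :: ps)).foldl pvStep res
    have hw : pvWrites ((x :: y :: t) :: ps) = (x, y) :: (y, x) :: pvWrites ps := by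
      simp [pvWrites]
    rw [hw, List.foldl_cons, List.foldl_cons]
    simp only [pvStep]
    by_cases hx : x ∈ pvAlpha
    · by_cases hy : y ∈ pvAlpha
      · have hbx : PySem.Chars.isIn [x] pvAlpha = true := (pv_isIn_singleton x pvAlpha).mpr hx
        have hby : PySem.Chars.isIn [y] pvAlpha = true := (pv_isIn_singleton y pvAlpha).mpr hy
        simp [hbx, hby, hx, hy]
      · have hby : PySem.Chars.isIn [y] pvAlpha = false := by
          rw [Bool.eq_false_iff]; intro hcon; exact hy ((pv_isIn_singleton y pvAlpha).mp hcon)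
        simp [hby, hy]
    · have hbx : PySem.Chars.isIn [x] pvAlpha = false := by
        rw [Bool.eq_false_iff]; intro hcon; exact hx ((pv_isIn_singleton x pvAlpha).mp hcon)
      simp [hbx, hx]

lemma pv_dict_last (ws : List (Char × Char)) (d : PySem.Dict Char Char) (c : Char) :
    (ws.foldl pvIns d).get? c
      = match ws.reverse.find? (fun w => w.1 == c) with
        | some w => some w.2
        | none => d.get? c := by
  induction ws using List.reverseRecOn generalizing d with
  | nil => simp
  | append_singleton ws w ih =>
    rw [List.foldl_append, List.foldl_cons, List.foldl_nil, List.reverse_append]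
    simp only [List.reverse_singleton, List.singleton_append, List.find?_cons]
    cases hbc : (w.1 == c)
    · have hc : w.1 ≠ c := by simpa using hbc
      show (pvIns (ws.foldl pvIns d) w).get? c = _
      rw [pvIns, PySem.Dict.get?_insert_of_ne _ _ (fun he => hc he.symm)]
      exact ih d
    · have hc : w.1 = c := by simpa using hbc
      subst hc
      show (pvIns (ws.foldl pvIns d) w).get? w.1 = some w.2
      rw [pvIns, PySem.Dict.get?_insert_self]

lemma pv_good_step (d : PySem.Dict Char Char) (res : List Int) (w : Char × Char)
    (h : pvGood d res) : pvGood (pvIns d w) (pvStep res w) := by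
  obtain ⟨hlen, hall⟩ := h
  by_cases hg : w.1 ∈ pvAlpha ∧ w.2 ∈ pvAlpha
  · obtain ⟨h1, h2⟩ := hg
    have b1 := pv_char_bounds w.1 h1
    have b2 := pv_char_bounds w.2 h2
    have hstep : pvStep res w = res.set (w.1.toNat - 65) ((w.2.toNat : Int) - 65) := by
      rw [pvStep, if_pos ⟨h1, h2⟩, PySem.List.pySetD_of_nonneg res ((w.2.toNat:Int) - 65) (show (0:Int) ≤ (w.1.toNat:Int) - 65 by omega)]
      congr 1
      omega
    rw [hstep]
    refine ⟨by simp [hlen], ?_⟩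
    intro c hc
    have bc := pv_char_bounds c hc
    constructor
    · intro v hv hva
      rw [pvIns, PySem.Dict.get?_insert] at hv
      by_cases hck : c = w.1
      · rw [if_pos hck] at hv
        cases hv
        subst hck
        rw [List.getD_eq_getElem?_getD, List.getElem?_set_self (by omega), Option.getD_some]
      · rw [if_neg hck] at hv
        have hne : c.toNat - 65 ≠ w.1.toNat - 65 := fun he => hck (pv_toNat_inj (by omega))
        rw [List.getD_eq_getElem?_getD, List.getElem?_set_ne hne.symm, ← List.getD_eq_getElem?_getD]
        exact (hall c hc).1 v hv hva
    · intro hv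
      rw [pvIns, PySem.Dict.get?_insert] at hv
      by_cases hck : c = w.1
      · rw [if_pos hck] at hv; cases hv
      · rw [if_neg hck] at hv
        have hne : c.toNat - 65 ≠ w.1.toNat - 65 := fun he => hck (pv_toNat_inj (by omega))
        rw [List.getD_eq_getElem?_getD, List.getElem?_set_ne hne.symm, ← List.getD_eq_getElem?_getD]
        exact (hall c hc).2 hv
  · have hstep : pvStep res w = res := by rw [pvStep, if_neg hg]
    rw [hstep]
    refine ⟨hlen, ?_⟩
    intro c hc
    constructor
    · intro v hv hva
      rw [pvIns, PySem.Dict.get?_insert] at hv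
      by_cases hck : c = w.1
      · rw [if_pos hck] at hv
        cases hv
        exact absurd ⟨hck ▸ hc, hva⟩ hg
      · rw [if_neg hck] at hv
        exact (hall c hc).1 v hv hva
    · intro hv
      rw [pvIns, PySem.Dict.get?_insert] at hv
      by_cases hck : c = w.1
      · rw [if_pos hck] at hv; cases hv
      · rw [if_neg hck] at hv
        exact (hall c hc).2 hv

lemma pv_good_foldl (ws : List (Char × Char)) (d : PySem.Dict Char Char) (res : List Int)
    (h : pvGood d res) : pvGood (ws.foldl pvIns d) (ws.foldl pvStep res) := by
  induction ws generalizing d res with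
  | nil => exact h
  | cons w ws ih => exact ih _ _ (pv_good_step d res w h)

lemma pv_good_init : pvGood PySem.Dict.empty (PySem.List.pyRange 0 26 1) := by
  refine ⟨by decide, ?_⟩
  intro c hc
  refine ⟨?_, ?_⟩
  · intro v hv; rw [PySem.Dict.get?_empty] at hv; cases hv
  · intro _
    fin_cases hc <;> decide

lemma pv_set_take (l : List Int) (k : Nat) (x : Int) (h : k < l.length) :
    (l.set k x).take (k + 1) = l.take k ++ [x] := by
  rw [List.set_eq_take_append_cons_drop, if_pos h]
  rw [show k + 1 = (l.take k).length + 1 by simp [Nat.min_eq_left (le_of_lt h)]]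
  rw [List.take_append]
  simp

lemma pv_loop_aux (d : PySem.Dict Char Char) (res : List Int)
    (H : ∀ c ∈ pvAlpha, ∀ v, d.get? c = some v → v ∈ pvAlpha)
    (hG : pvGood d res) :
    ∀ (l : List Char) (k : Nat) (r0 : List Int), r0.length = 26 → k + l.length = 26 →
    (∀ j, (hj : j < l.length) → l[j] ∈ pvAlpha ∧ l[j].toNat = 65 + k + j) →
    (PySem.List.enumerate l (k : Int)).foldl (fun acc il =>
        acc.bind fun r =>
          if d.contains il.2 then
            (d.get? il.2).bind fun v =>
              let j := PySem.Chars.find pvAlpha [v]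
              if j = -1 then none else some (PySem.List.pySetD r il.1 j)
          else some (PySem.List.pySetD r il.1 il.1))
        (some r0)
      = some (r0.take k ++ res.drop k) := by
  obtain ⟨hres, hall⟩ := hG
  intro l
  induction l with
  | nil =>
    intro k r0 hr0 hk _
    simp only [List.length_nil] at hk
    simp only [PySem.List.enumerate_nil, List.foldl_nil]
    rw [List.take_of_length_le (by omega), List.drop_of_length_le (by omega), List.append_nil]
  | cons c tl ih =>
    intro k r0 hr0 hk hal
    have hc : c ∈ pvAlpha ∧ c.toNat = 65 + k + 0 := by
      have := hal 0 (by simp)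
      simpa using this
    obtain ⟨hcm, hct⟩ := hc
    have hk26 : k < 26 := by simp at hk; omega
    rw [PySem.List.enumerate_cons, List.foldl_cons]
    have hstep : ((some r0).bind fun r =>
          if d.contains c then
            (d.get? c).bind fun v =>
              let j := PySem.Chars.find pvAlpha [v]
              if j = -1 then none else some (PySem.List.pySetD r ((k : Int)) j)
          else some (PySem.List.pySetD r ((k : Int)) ((k : Int))))
        = some (r0.set k (res.getD k 0)) := by
      rw [Option.bind_some]
      rw [PySem.Dict.contains_eq_isSome_get?]
      cases hd : d.get? c with
      | some v =>
        have hv : v ∈ pvAlpha := H c hcm v hd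
        have bv := pv_char_bounds v hv
        have hck : c.toNat - 65 = k := by omega
        simp only [Option.isSome_some, Option.bind_some, if_true]
        simp only [pv_find_alpha v hv]
        have hne : ¬((v.toNat : Int) - 65 = -1) := by omega
        rw [if_neg hne, PySem.List.pySetD_natCast]
        have hv' : res.getD k 0 = (v.toNat : Int) - 65 := by
          rw [← hck]; exact (hall c hcm).1 v hd hv
        rw [hv']
      | none =>
        have hck : c.toNat - 65 = k := by omega
        simp only [Option.isSome_none, Bool.false_eq_true, if_false, PySem.List.pySetD_natCast]
        have hv' : res.getD k 0 = (c.toNat : Int) - 65 := by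
          rw [← hck]; exact (hall c hcm).2 hd
        rw [hv']
        congr 2
        omega
    rw [hstep]
    have hcast : (k : Int) + 1 = ((k + 1 : Nat) : Int) := by push_cast; ring
    rw [hcast]
    rw [ih (k + 1) _ (by simp [hr0]) (by simp at hk ⊢; omega)
      (fun j hj => by
        have := hal (j + 1) (by simp; omega)
        simpa [Nat.add_assoc, Nat.add_comm 1 j] using this)]
    congr 1
    have hkr : k < r0.length := by omega
    rw [pv_set_take _ _ _ hkr]
    have hget : res.getD k 0 = res[k]'(by omega) := by
      rw [List.getD_eq_getElem?_getD, List.getElem?_eq_getElem (by omega), Option.getD_some]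
    rw [List.drop_eq_getElem_cons (by omega : k < res.length)]
    simp only [hget]
    simp

lemma pv_second_loop (d : PySem.Dict Char Char) (res : List Int)
    (H : ∀ c ∈ pvAlpha, ∀ v, d.get? c = some v → v ∈ pvAlpha)
    (hG : pvGood d res) :
    (PySem.List.enumerate pvAlpha).foldl (fun acc il =>
        acc.bind fun r =>
          if d.contains il.2 then
            (d.get? il.2).bind fun v =>
              let j := PySem.Chars.find pvAlpha [v]
              if j = -1 then none else some (PySem.List.pySetD r il.1 j)
          else some (PySem.List.pySetD r il.1 il.1))
        (some (List.replicate 26 (0 : Int)))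
      = some res := by
  have := pv_loop_aux d res H hG pvAlpha 0 (List.replicate 26 0) (by decide) (by decide)
    (by decide)
  simpa using this

-- ===== VERDICT (by name: the statement is the Claim_ definition above) =====
theorem set_reflector_spec : Claim_equal_set_reflector := by
  unfold Claim_equal_set_reflector
  intro reflectors _ hpre
  unfold Spec_set_reflector
  cases reflectors with
  | none => rfl
  | some r0 =>
    obtain ⟨h1, h2⟩ := hpre
    simp only [List.all_eq_true, decide_eq_true_eq] at h1
    rw [set_reflector, set_reflector_alt]
    rw [pv_buildA _ _ h1, pv_buildB _ _ h1, Option.bind_some]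
    apply pv_second_loop
    · intro c hc v hv
      rw [pv_dict_last] at hv
      cases hfind : (pvWrites (PySem.Chars.splitOn (PySem.Chars.upper r0.toList) [' '])).reverse.find?
          (fun w => w.1 == c) with
      | some w =>
        rw [hfind] at hv
        cases hv
        have hcall := List.all_eq_true.mp h2 c hc
        rw [hfind] at hcall
        simp only [Option.all_some] at hcall
        simpa using hcall
      | none =>
        rw [hfind] at hv
        rw [PySem.Dict.get?_empty] at hv
        cases hv
    · exact pv_good_foldl _ _ _ pv_good_init
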